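-- pv_equiv track=rewrite | github.com/natevitz6/K-in-a-Row | natevitz_KInARow.py | count_unblocked_sequence
-- ===== SOURCE A (Python) =====
-- def count_unblocked_sequence(player, sequence, k):
--     max_unblocked = current_unblocked = open_spaces = 0
--
--     for cell in sequence + [None]:
--         if cell == player:
--             current_unblocked += 1
--             open_spaces += 1
--         elif cell == " ":
--             open_spaces += 1
--         else:
--             if open_spaces >= k:
--                 max_unblocked = max(max_unblocked, current_unblocked)
--             current_unblocked = open_spaces = 0
--
--     return max_unblocked
-- ===== SOURCE B (Python) =====
-- def count_unblocked_sequence(player, sequence, k):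
--     # Build the list of runs of player/blank cells (every run is terminated,
--     # since the sentinel None in the original always flushes), then reduce.
--     segments = []
--     cur = []
--     for cell in sequence:
--         if cell == player or cell == " ":
--             cur.append(cell)
--         else:
--             segments.append(cur)
--             cur = []
--     segments.append(cur)
--     best = 0
--     for seg in segments:
--         if len(seg) >= k:
--             best = max(best, seg.count(player))
--     return best
-- ===== Notes on version B (the rewrite author's own statement) =====
-- stated objective: alternative
-- what changed: Replaces the single running-counter loop (max/current/open with a None sentinel) by a build-then-reduce decomposition: first split the sequence into terminated runs of player/blank cells, then take the max player-count over runs of length >= k.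
import Mathlib
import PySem

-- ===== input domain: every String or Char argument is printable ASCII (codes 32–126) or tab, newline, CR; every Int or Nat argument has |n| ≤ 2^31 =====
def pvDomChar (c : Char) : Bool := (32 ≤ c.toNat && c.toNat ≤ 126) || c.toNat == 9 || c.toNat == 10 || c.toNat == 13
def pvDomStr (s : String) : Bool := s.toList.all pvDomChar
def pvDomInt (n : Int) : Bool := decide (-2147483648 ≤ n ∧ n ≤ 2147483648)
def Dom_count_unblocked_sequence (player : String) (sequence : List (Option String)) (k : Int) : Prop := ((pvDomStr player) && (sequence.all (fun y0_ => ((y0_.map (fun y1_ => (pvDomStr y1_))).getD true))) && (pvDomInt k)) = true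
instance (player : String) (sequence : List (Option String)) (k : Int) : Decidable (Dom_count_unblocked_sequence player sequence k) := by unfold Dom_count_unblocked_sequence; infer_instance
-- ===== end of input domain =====

-- B replaces A's running-counter loop by a build-segments-then-reduce decomposition (alternative, same cost).


-- ===== PORT A =====
-- state = (max_unblocked, current_unblocked, open_spaces)
def pvAStep (player : String) (k : Int) (st : Int × Int × Int) (cell : Option String) : Int × Int × Int :=
  if cell = some player then (st.1, st.2.1 + 1, st.2.2 + 1)
  else if cell = some " " then (st.1, st.2.1, st.2.2 + 1)
  else ((if st.2.2 ≥ k then max st.1 st.2.1 else st.1), 0, 0)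

def count_unblocked_sequence (player : String) (sequence : List (Option String)) (k : Int) : Int :=
  ((sequence ++ [none]).foldl (pvAStep player k) (0, 0, 0)).1

-- ===== PORT B =====
def pvGood (player : String) (cell : Option String) : Bool :=
  cell = some player || cell = some " "

-- the loop of Source B: split into runs, flushing at each blocker, plus the final flush
def pvSegs (player : String) : List (Option String) → List (Option String) → List (List (Option String))
  | [], cur => [cur]
  | cell :: rest, cur =>
    if pvGood player cell then pvSegs player rest (cur ++ [cell])
    else cur :: pvSegs player rest []

-- the reduce loop of Source B
def pvScore (player : String) (k : Int) (best : Int) (seg : List (Option String)) : Int :=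
  if (seg.length : Int) ≥ k then max best (seg.count (some player) : Int) else best

def count_unblocked_sequence_alt (player : String) (sequence : List (Option String)) (k : Int) : Int :=
  (pvSegs player sequence []).foldl (pvScore player k) 0

-- ===== PRECONDITION & SPEC =====
def Spec_count_unblocked_sequence (player : String) (sequence : List (Option String)) (k : Int) (out : Int) : Prop := out = count_unblocked_sequence_alt player sequence k
instance (player : String) (sequence : List (Option String)) (k : Int) (out : Int) : Decidable (Spec_count_unblocked_sequence player sequence k out) := by unfold Spec_count_unblocked_sequence; infer_instance

-- ===== CLAIM (what is proved, stated in full; the proofs are below) =====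
def Claim_equal_count_unblocked_sequence : Prop := ∀ (player : String) (sequence : List (Option String)) (k : Int), Dom_count_unblocked_sequence player sequence k → Spec_count_unblocked_sequence player sequence k (count_unblocked_sequence player sequence k)

-- ===== LEMMAS AND PROOFS =====
lemma pv_key (player : String) (k : Int) :
    ∀ (l cur : List (Option String)) (m : Int),
      ((l ++ [none]).foldl (pvAStep player k)
          (m, (cur.count (some player) : Int), (cur.length : Int))).1
        = (pvSegs player l cur).foldl (pvScore player k) m := by
  intro l
  induction l with
  | nil =>
      intro cur m
      simp [pvAStep, pvSegs, pvScore]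
  | cons x rest ih =>
      intro cur m
      by_cases hp : x = some player
      · subst hp
        have e : pvAStep player k (m, (cur.count (some player) : Int), (cur.length : Int))
              (some player)
            = (m, ((cur ++ [some player]).count (some player) : Int),
                ((cur ++ [some player]).length : Int)) := by
          simp [pvAStep, List.count_append]
        rw [List.cons_append, List.foldl_cons, e, ih]
        simp [pvSegs, pvGood]
      · by_cases hs : x = some " "
        · subst hs
          have e : pvAStep player k (m, (cur.count (some player) : Int), (cur.length : Int))
                (some " ")
              = (m, ((cur ++ [some " "]).count (some player) : Int),
                  ((cur ++ [some " "]).length : Int)) := by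
            simp [pvAStep, List.count_append, hp]
          rw [List.cons_append, List.foldl_cons, e, ih]
          simp [pvSegs, pvGood, hp]
        · have e : pvAStep player k (m, (cur.count (some player) : Int), (cur.length : Int)) x
              = (pvScore player k m cur,
                  ((([] : List (Option String)).count (some player)) : Int),
                  ((([] : List (Option String)).length) : Int)) := by
            simp [pvAStep, pvScore, hp, hs]
          rw [List.cons_append, List.foldl_cons, e, ih]
          simp [pvSegs, pvGood, hp, hs]

-- ===== VERDICT (by name: the statement is the Claim_ definition above) =====
theorem count_unblocked_sequence_spec : Claim_equal_count_unblocked_sequence := by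
  intro player sequence k _
  show _ = _
  unfold count_unblocked_sequence count_unblocked_sequence_alt
  simpa using pv_key player k sequence [] 0
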